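-- pv_equiv track=rewrite | github.com/aldrinc/foundry | services/foundry-server/src/foundry_server/orchestration/executor.py | _review_from_states
-- ===== SOURCE A (Python) =====
-- from typing import Any, Dict, Iterator, List, Optional, Tuple
--
-- def _review_from_states(states: List[str]) -> str:
--     normalized = [item.lower() for item in states if item]
--     if any(item in {"changes_requested", "request_changes"} for item in normalized):
--         return "changes_requested"
--     if any(item in {"approved", "approve"} for item in normalized):
--         return "approved"
--     if normalized:
--         return "pending"
--     return "none"
-- ===== SOURCE B (Python) =====
-- _RANK = {"changes_requested": 3, "request_changes": 3, "approved": 2, "approve": 2}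
-- _VERDICT = ["none", "pending", "approved", "changes_requested"]
--
-- def _review_from_states(states):
--     best = 0
--     for item in states:
--         if item:
--             best = max(best, _RANK.get(item.lower(), 1))
--     return _VERDICT[best]
-- ===== Notes on version B (the rewrite author's own statement) =====
-- stated objective: alternative
-- what changed: Replaces the staged prioritized membership passes over a normalized list by a max-reduction: each state is mapped to a numeric severity rank via a lookup table and the verdict is read from a table at the maximum rank.
import Mathlib
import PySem

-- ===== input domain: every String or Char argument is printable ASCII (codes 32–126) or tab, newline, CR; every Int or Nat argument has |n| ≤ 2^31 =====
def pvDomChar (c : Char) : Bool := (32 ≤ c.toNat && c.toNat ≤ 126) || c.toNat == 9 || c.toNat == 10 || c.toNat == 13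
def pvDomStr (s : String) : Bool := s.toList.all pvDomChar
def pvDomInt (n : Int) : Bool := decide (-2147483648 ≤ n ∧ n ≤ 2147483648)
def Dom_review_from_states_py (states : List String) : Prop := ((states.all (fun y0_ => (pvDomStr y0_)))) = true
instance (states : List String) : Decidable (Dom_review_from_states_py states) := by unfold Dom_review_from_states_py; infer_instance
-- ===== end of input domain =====

-- ===== PORT A =====
-- header: B replaces A's staged membership passes with a rank table + max-reduction (alternative, same cost); same return values.
def review_from_states_py (states : List String) : String :=
  let normalized := (states.filter (fun item => item ≠ "")).map PySem.Str.lower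
  if normalized.any (fun item => item = "changes_requested" || item = "request_changes") then
    "changes_requested"
  else if normalized.any (fun item => item = "approved" || item = "approve") then
    "approved"
  else if normalized ≠ [] then "pending"
  else "none"

-- ===== PORT B =====
-- _RANK.get(low, 1): the dict lookup with default, written as its lookup function
def pvRankGet (s : String) : Nat :=
  if s = "changes_requested" then 3
  else if s = "request_changes" then 3
  else if s = "approved" then 2
  else if s = "approve" then 2
  else 1

def pvVerdict : List String := ["none", "pending", "approved", "changes_requested"]

def review_from_states_py_alt (states : List String) : String :=
  let best := states.foldl (fun best item =>
    if item ≠ "" then max best (pvRankGet (PySem.Str.lower item)) else best) 0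
  pvVerdict.getD best ""

-- ===== PRECONDITION & SPEC =====
def Spec_review_from_states_py (states : List String) (out : String) : Prop := out = review_from_states_py_alt states
instance (states : List String) (out : String) : Decidable (Spec_review_from_states_py states out) := by unfold Spec_review_from_states_py; infer_instance

-- ===== CLAIM (what is proved, stated in full; the proofs are below) =====
def Claim_equal_review_from_states_py : Prop := ∀ (states : List String), Dom_review_from_states_py states → Spec_review_from_states_py states (review_from_states_py states)

-- ===== LEMMAS AND PROOFS =====

-- the max-rank of the normalized list, as a foldr
def rankMax (n : List String) : Nat := n.foldr (fun s acc => max (pvRankGet s) acc) 0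

theorem foldl_best_eq (states : List String) (b : Nat) :
    states.foldl (fun best item =>
      if item ≠ "" then max best (pvRankGet (PySem.Str.lower item)) else best) b
    = max b (rankMax ((states.filter (fun item => item ≠ "")).map PySem.Str.lower)) := by
  induction states generalizing b with
  | nil => simp [rankMax]
  | cons h t ih =>
    by_cases hh : h = ""
    · rw [List.foldl_cons, if_neg (by simp [hh])]
      simpa [hh] using ih b
    · rw [List.foldl_cons, if_pos (by simp [hh]), ih]
      simp [hh, rankMax, Nat.max_assoc]

theorem pvRankGet_le (s : String) : pvRankGet s ≤ 3 := by
  unfold pvRankGet; split_ifs <;> omega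

theorem pvRankGet_ge3 (s : String) :
    3 ≤ pvRankGet s ↔ (s = "changes_requested" ∨ s = "request_changes") := by
  unfold pvRankGet; split_ifs <;> simp_all

theorem pvRankGet_ge2 (s : String) :
    2 ≤ pvRankGet s ↔ (s = "changes_requested" ∨ s = "request_changes" ∨ s = "approved" ∨ s = "approve") := by
  unfold pvRankGet; split_ifs <;> simp_all

theorem pvRankGet_ge1 (s : String) : 1 ≤ pvRankGet s := by
  unfold pvRankGet; split_ifs <;> omega

theorem rankMax_le (n : List String) : rankMax n ≤ 3 := by
  induction n with
  | nil => simp [rankMax]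
  | cons h t ih => exact max_le (pvRankGet_le h) ih

theorem rankMax_ge3 (n : List String) :
    3 ≤ rankMax n ↔ n.any (fun s => s = "changes_requested" || s = "request_changes") := by
  induction n with
  | nil => simp [rankMax]
  | cons h t ih =>
    show 3 ≤ max (pvRankGet h) (rankMax t) ↔ _
    simp [ih, pvRankGet_ge3]

theorem rankMax_ge2 (n : List String) :
    2 ≤ rankMax n ↔
      (n.any (fun s => s = "changes_requested" || s = "request_changes")
        || n.any (fun s => s = "approved" || s = "approve")) := by
  induction n with
  | nil => simp [rankMax]
  | cons h t ih =>
    show 2 ≤ max (pvRankGet h) (rankMax t) ↔ _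
    simp only [le_max_iff, ih, pvRankGet_ge2, List.any_cons, Bool.or_eq_true, decide_eq_true_eq]
    tauto

theorem rankMax_ge1 (n : List String) : 1 ≤ rankMax n ↔ n ≠ [] := by
  induction n with
  | nil => simp [rankMax]
  | cons h t ih =>
    show 1 ≤ max (pvRankGet h) (rankMax t) ↔ _
    simp [pvRankGet_ge1 h]

theorem rankMax_eq (n : List String) :
    rankMax n =
      if n.any (fun s => s = "changes_requested" || s = "request_changes") then 3
      else if n.any (fun s => s = "approved" || s = "approve") then 2
      else if n = [] then 0 else 1 := by
  have hle := rankMax_le n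
  have h3 := rankMax_ge3 n
  have h2 := rankMax_ge2 n
  have h1 := rankMax_ge1 n
  by_cases c3 : n.any (fun s => s = "changes_requested" || s = "request_changes") = true
  · rw [if_pos c3]
    have := h3.mpr c3
    omega
  · rw [if_neg c3]
    have h3' : ¬ 3 ≤ rankMax n := fun h => c3 (h3.mp h)
    by_cases c2 : n.any (fun s => s = "approved" || s = "approve") = true
    · rw [if_pos c2]
      have := h2.mpr (by simp [c2])
      omega
    · rw [if_neg c2]
      have h2' : ¬ 2 ≤ rankMax n := fun h => by
        have := h2.mp h
        simp only [Bool.or_eq_true] at this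
        exact this.elim c3 c2
      by_cases cn : n = []
      · rw [if_pos cn]
        have h1' : ¬ 1 ≤ rankMax n := fun h => (h1.mp h) cn
        omega
      · rw [if_neg cn]
        have := h1.mpr cn
        omega

theorem review_from_states_py_spec : Claim_equal_review_from_states_py := by
  intro states _
  unfold Spec_review_from_states_py review_from_states_py review_from_states_py_alt
  rw [foldl_best_eq, Nat.zero_max, rankMax_eq]
  set n := (states.filter (fun item => item ≠ "")).map PySem.Str.lower with hn
  by_cases h1 : n.any (fun s => s = "changes_requested" || s = "request_changes")
  · simp [h1, pvVerdict]
  · by_cases h2 : n.any (fun s => s = "approved" || s = "approve")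
    · simp [h1, h2, pvVerdict]
    · by_cases h3 : n = [] <;> simp [h1, h2, h3, pvVerdict]
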